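-- pv_equiv track=rewrite | github.com/vbronetskyi/OP_python | cms1/LB_4/lab4_task_1.py | compare_char
-- ===== SOURCE A (Python) =====
-- from string import ascii_uppercase
-- from string import ascii_lowercase
--
-- def compare_char(ch1, ch2):
--     """
--     (str, str) -> bool
--     Compare two char by their position in alphabet. Return True if letter
--     ch2 appears before ch1 and False otherwise. If neither ch1 nor ch2 are
--     letters function should return None.
--
--     >>> compare_char('a', 'z')
--     False
--     >>> compare_char('c', 'B')
--     True
--     >>> compare_char('d', 'ad')
--
--     >>> compare_char('2', 2)
--
--     """
--     solut = None
--     flg1 = False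
--     flg2 = False
--
--     for i in range(26):
--         if ch2 in (ascii_uppercase[i], ascii_lowercase[i]):
--             flg2 = True
--         if ch1 in (ascii_uppercase[i], ascii_lowercase[i]):
--             flg1 = True
--
--     if flg1 & flg2:
--         for i in range(26):
--             if ch2 in (ascii_uppercase[i], ascii_lowercase[i]):
--                 solut = True
--                 break
--             if ch1 in (ascii_uppercase[i], ascii_lowercase[i]):
--                 solut = False
--                 break
--     return solut
-- ===== SOURCE B (Python) =====
-- def _pos(ch):
--     """Alphabet index 0..25 of a single-letter string, else None."""
--     if isinstance(ch, str) and len(ch) == 1: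
--         c = ch.lower()
--         if 'a' <= c <= 'z':
--             return ord(c) - ord('a')
--     return None
--
--
-- def compare_char(ch1, ch2):
--     p1 = _pos(ch1)
--     p2 = _pos(ch2)
--     if p1 is None or p2 is None:
--         return None
--     return p2 <= p1
-- ===== Notes on version B (the rewrite author's own statement) =====
-- stated objective: simpler
-- what changed: Replaces the two 26-iteration scans over the alphabet strings with closed-form ord arithmetic: a helper computes each argument's alphabet index directly and the result is one comparison p2 <= p1.
import Mathlib
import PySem

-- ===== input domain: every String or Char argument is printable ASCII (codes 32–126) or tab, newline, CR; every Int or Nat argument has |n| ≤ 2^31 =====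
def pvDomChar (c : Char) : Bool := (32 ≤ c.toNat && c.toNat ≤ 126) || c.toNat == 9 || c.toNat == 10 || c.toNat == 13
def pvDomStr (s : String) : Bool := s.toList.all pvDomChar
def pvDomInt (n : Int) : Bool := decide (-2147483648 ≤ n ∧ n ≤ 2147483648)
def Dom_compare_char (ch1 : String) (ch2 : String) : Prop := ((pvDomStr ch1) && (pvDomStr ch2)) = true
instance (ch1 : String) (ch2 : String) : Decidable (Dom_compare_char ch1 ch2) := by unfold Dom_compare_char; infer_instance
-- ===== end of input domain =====

-- B replaces A's two 26-step scans over the alphabet strings with closed-form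
-- character arithmetic (lower-case, then index = code - 'a'); objective: simpler.

-- ===== PORT A =====
-- ascii_uppercase[i] / ascii_lowercase[i] (i always 0..25, in range, so the
-- Option from pyGet? is peeled with getD; exact on every input reached)
def pvUp (i : Nat) : Char := (PySem.Str.pyGet? "ABCDEFGHIJKLMNOPQRSTUVWXYZ" (Int.ofNat i)).getD 'A'
def pvLo (i : Nat) : Char := (PySem.Str.pyGet? "abcdefghijklmnopqrstuvwxyz" (Int.ofNat i)).getD 'a'

-- `ch in (ascii_uppercase[i], ascii_lowercase[i])`: equality of ch with a 1-char string
def pvIn (ch : String) (i : Nat) : Bool :=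
  ch == String.ofList [pvUp i] || ch == String.ofList [pvLo i]

-- first loop: the pair of flags (flg1, flg2) threaded through range(26)
def pvFlags (ch1 ch2 : String) : Bool × Bool :=
  (List.range 26).foldl
    (fun fl i => (if pvIn ch1 i then true else fl.1, if pvIn ch2 i then true else fl.2))
    (false, false)

-- second loop with its two breaks; [] = loop ended without break (solut stays None)
def pvLoop (ch1 ch2 : String) : List Nat → Option Bool
  | [] => none
  | i :: rest =>
    if pvIn ch2 i then some true
    else if pvIn ch1 i then some false
    else pvLoop ch1 ch2 rest

def compare_char (ch1 : String) (ch2 : String) : Option Bool :=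
  let fl := pvFlags ch1 ch2
  if fl.1 && fl.2 then pvLoop ch1 ch2 (List.range 26) else none

-- ===== PORT B =====
-- _pos: alphabet index of a single-letter string, else none
def pvPos (ch : String) : Option Int :=
  match ch.toList with
  | [c] =>
    let lc := PySem.Chars.lowerChar c
    if 'a' ≤ lc ∧ lc ≤ 'z' then some ((lc.toNat : Int) - 97) else none
  | _ => none

def compare_char_alt (ch1 : String) (ch2 : String) : Option Bool :=
  match pvPos ch1, pvPos ch2 with
  | some p1, some p2 => some (decide (p2 ≤ p1))
  | _, _ => none

-- ===== PRECONDITION & SPEC =====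
def Spec_compare_char (ch1 : String) (ch2 : String) (out : Option Bool) : Prop := out = compare_char_alt ch1 ch2
instance (ch1 : String) (ch2 : String) (out : Option Bool) : Decidable (Spec_compare_char ch1 ch2 out) := by unfold Spec_compare_char; infer_instance

-- ===== CLAIM (what is proved, stated in full; the proofs are below) =====
def Claim_equal_compare_char : Prop := ∀ (ch1 : String) (ch2 : String), Dom_compare_char ch1 ch2 → Spec_compare_char ch1 ch2 (compare_char ch1 ch2)

-- ===== LEMMAS AND PROOFS =====

-- pvLoop with the matching tests replaced by index equations (proof helper)
def pvLoopN (k1 k2 : Nat) : List Nat → Option Bool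
  | [] => none
  | i :: rest =>
    if i = k2 then some true
    else if i = k1 then some false
    else pvLoopN k1 k2 rest

theorem pv_char_eq_iff (c d : Char) : c = d ↔ c.toNat = d.toNat := by
  constructor
  · intro h; subst h; rfl
  · intro h; rw [← Char.ofNat_toNat c, ← Char.ofNat_toNat d, h]

theorem pv_char_le_iff (a b : Char) : a ≤ b ↔ a.toNat ≤ b.toNat := by
  rw [Char.le_def, UInt32.le_iff_toNat_le]
  exact Iff.rfl

theorem pv_toNat_ofNat (n : Nat) (h : n < 55000) : (Char.ofNat n).toNat = n := by
  simp [Char.toNat_ofNat]; omega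

theorem pv_eq_single_iff (s : String) (c : Char) :
    (s = String.ofList [c]) ↔ s.toList = [c] := by
  constructor
  · intro h; subst h; simp
  · intro h; apply String.toList_inj.mp; simpa

theorem pvIn_iff (ch : String) (i : Nat) :
    pvIn ch i = true ↔ ch.toList = [pvUp i] ∨ ch.toList = [pvLo i] := by
  simp [pvIn, pv_eq_single_iff]

theorem pvUp_toNat : ∀ i < 26, (pvUp i).toNat = 65 + i ∧ (pvLo i).toNat = 97 + i := by decide

theorem pvFlags_eq (ch1 ch2 : String) :
    pvFlags ch1 ch2 = ((List.range 26).any (pvIn ch1), (List.range 26).any (pvIn ch2)) := by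
  have h : ∀ (l : List Nat) (a b : Bool),
      l.foldl (fun fl i => (if pvIn ch1 i then true else fl.1,
                            if pvIn ch2 i then true else fl.2)) (a, b)
        = (a || l.any (pvIn ch1), b || l.any (pvIn ch2)) := by
    intro l
    induction l with
    | nil => intro a b; simp
    | cons x xs ih =>
      intro a b
      simp only [List.foldl_cons, List.any_cons, ih]
      cases hx1 : pvIn ch1 x <;> cases hx2 : pvIn ch2 x <;> simp
  unfold pvFlags
  rw [h]
  simp

-- the lower-case mapping of c, as arithmetic on codes
theorem pv_lower_case (c : Char) :
    ((PySem.Chars.lowerChar c).toNat = c.toNat + 32 ∧ 65 ≤ c.toNat ∧ c.toNat ≤ 90)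
    ∨ ((PySem.Chars.lowerChar c).toNat = c.toNat ∧ ¬ (65 ≤ c.toNat ∧ c.toNat ≤ 90)) := by
  have hA : ('A').toNat = 65 := rfl
  have hZ : ('Z').toNat = 90 := rfl
  by_cases h1 : 'A' ≤ c
  · by_cases h2 : c ≤ 'Z'
    · left
      have hn1 : 65 ≤ c.toNat := by rw [← hA]; exact (pv_char_le_iff _ _).mp h1
      have hn2 : c.toNat ≤ 90 := by rw [← hZ]; exact (pv_char_le_iff _ _).mp h2
      refine ⟨?_, hn1, hn2⟩
      unfold PySem.Chars.lowerChar PySem.Chars.isupper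
      rw [if_pos (by simp [h1, h2])]
      exact pv_toNat_ofNat _ (by omega)
    · right
      have hn2 : ¬ c.toNat ≤ 90 := fun hc => h2 ((pv_char_le_iff _ _).mpr (by rw [hZ]; exact hc))
      refine ⟨?_, fun hc => hn2 hc.2⟩
      unfold PySem.Chars.lowerChar PySem.Chars.isupper
      rw [if_neg (by simp [h2])]
  · right
    have hn1 : ¬ 65 ≤ c.toNat := fun hc => h1 ((pv_char_le_iff _ _).mpr (by rw [hA]; exact hc))
    refine ⟨?_, fun hc => hn1 hc.1⟩
    unfold PySem.Chars.lowerChar PySem.Chars.isupper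
    rw [if_neg (by simp [h1])]

theorem pv_lower_bounds (c : Char)
    (ha : 'a' ≤ PySem.Chars.lowerChar c) (hz : PySem.Chars.lowerChar c ≤ 'z') :
    97 ≤ (PySem.Chars.lowerChar c).toNat ∧ (PySem.Chars.lowerChar c).toNat ≤ 122 := by
  have haN : ('a').toNat = 97 := rfl
  have hzN : ('z').toNat = 122 := rfl
  exact ⟨by rw [← haN]; exact (pv_char_le_iff _ _).mp ha,
         by rw [← hzN]; exact (pv_char_le_iff _ _).mp hz⟩

-- a non-letter argument (pvPos = none) never matches any alphabet position
theorem pvIn_none (ch : String) (hch : pvPos ch = none) :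
    ∀ i < 26, pvIn ch i = false := by
  intro i hi
  have hlet : ('a' ≤ PySem.Chars.lowerChar (pvUp i) ∧ PySem.Chars.lowerChar (pvUp i) ≤ 'z')
      ∧ ('a' ≤ PySem.Chars.lowerChar (pvLo i) ∧ PySem.Chars.lowerChar (pvLo i) ≤ 'z') := by
    revert hi; revert i; decide
  by_contra hcon
  have htrue : pvIn ch i = true := by
    cases h : pvIn ch i
    · exact absurd h hcon
    · rfl
  rcases (pvIn_iff ch i).mp htrue with h | h <;>
    simp [pvPos, h, hlet.1.1, hlet.1.2, hlet.2.1, hlet.2.2] at hch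

-- a letter argument matches exactly its own alphabet index
theorem pvIn_letter (ch : String) (c : Char)
    (hl : ch.toList = [c])
    (ha : 'a' ≤ PySem.Chars.lowerChar c) (hz : PySem.Chars.lowerChar c ≤ 'z') :
    ∀ i < 26, pvIn ch i = decide (i = (PySem.Chars.lowerChar c).toNat - 97) := by
  intro i hi
  obtain ⟨hu, hlo⟩ := pvUp_toNat i hi
  obtain ⟨ha', hz'⟩ := pv_lower_bounds c ha hz
  have hiff : pvIn ch i = true ↔ c = pvUp i ∨ c = pvLo i := by
    rw [pvIn_iff, hl]
    simp
  have hmain : pvIn ch i = true ↔ i = (PySem.Chars.lowerChar c).toNat - 97 := by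
    rw [hiff, pv_char_eq_iff c (pvUp i), pv_char_eq_iff c (pvLo i), hu, hlo]
    rcases pv_lower_case c with ⟨heq, hb1, hb2⟩ | ⟨heq, hb⟩
    · constructor
      · rintro (h | h) <;> omega
      · intro h; left; omega
    · constructor
      · rintro (h | h) <;> omega
      · intro h; right; omega
  by_cases hik : i = (PySem.Chars.lowerChar c).toNat - 97
  · rw [hmain.mpr hik, decide_eq_true hik]
  · have hfalse : pvIn ch i = false := by
      cases h : pvIn ch i
      · rfl
      · exact absurd (hmain.mp h) hik
    rw [hfalse, decide_eq_false hik]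

theorem pvLoop_congr (ch1 ch2 : String) (k1 k2 : Nat)
    (h1 : ∀ i < 26, pvIn ch1 i = decide (i = k1))
    (h2 : ∀ i < 26, pvIn ch2 i = decide (i = k2)) :
    ∀ l : List Nat, (∀ i ∈ l, i < 26) → pvLoop ch1 ch2 l = pvLoopN k1 k2 l := by
  intro l
  induction l with
  | nil => intro _; rfl
  | cons x xs ih =>
    intro hmem
    have hx : x < 26 := hmem x (List.mem_cons_self)
    simp only [pvLoop, pvLoopN, h1 x hx, h2 x hx, decide_eq_true_eq,
      ih (fun i hi => hmem i (List.mem_cons_of_mem _ hi))]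

theorem pvLoopN_range : ∀ k1 < 26, ∀ k2 < 26,
    pvLoopN k1 k2 (List.range 26) = some (decide (k2 ≤ k1)) := by decide

-- characterize pvPos on the some-case
theorem pvPos_some (ch : String) (p : Int) (hp : pvPos ch = some p) :
    ∃ c, ch.toList = [c] ∧ 'a' ≤ PySem.Chars.lowerChar c ∧ PySem.Chars.lowerChar c ≤ 'z'
      ∧ p = ((PySem.Chars.lowerChar c).toNat : Int) - 97 := by
  unfold pvPos at hp
  rcases hl : ch.toList with _ | ⟨c, _ | _⟩ <;> rw [hl] at hp <;> simp at hp
  · exact ⟨c, rfl, hp.1.1, hp.1.2, hp.2.symm⟩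

theorem pv_flag_none (ch : String) (hch : pvPos ch = none) :
    (List.range 26).any (pvIn ch) = false := by
  rw [Bool.eq_false_iff]
  intro hany
  rw [List.any_eq_true] at hany
  obtain ⟨i, hi, hin⟩ := hany
  rw [List.mem_range] at hi
  rw [pvIn_none ch hch i hi] at hin
  exact Bool.false_ne_true hin

theorem pv_flag_letter (ch : String) (k : Nat) (hk : k < 26)
    (h : ∀ i < 26, pvIn ch i = decide (i = k)) :
    (List.range 26).any (pvIn ch) = true := by
  rw [List.any_eq_true]
  exact ⟨k, List.mem_range.mpr hk, by rw [h k hk]; simp⟩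

-- ===== VERDICT (by name: the statement is the Claim_ definition above) =====
theorem compare_char_spec : Claim_equal_compare_char := by
  intro ch1 ch2 _
  unfold Spec_compare_char compare_char compare_char_alt
  rw [pvFlags_eq]
  cases hp1 : pvPos ch1 with
  | none =>
    rw [pv_flag_none ch1 hp1]
    simp
  | some p1 =>
    cases hp2 : pvPos ch2 with
    | none =>
      rw [pv_flag_none ch2 hp2]
      simp
    | some p2 =>
      obtain ⟨c1, hl1, ha1, hz1, hv1⟩ := pvPos_some ch1 p1 hp1
      obtain ⟨c2, hl2, ha2, hz2, hv2⟩ := pvPos_some ch2 p2 hp2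
      obtain ⟨ha1', hz1'⟩ := pv_lower_bounds c1 ha1 hz1
      obtain ⟨ha2', hz2'⟩ := pv_lower_bounds c2 ha2 hz2
      set k1 := (PySem.Chars.lowerChar c1).toNat - 97 with hk1def
      set k2 := (PySem.Chars.lowerChar c2).toNat - 97 with hk2def
      have hk1 : k1 < 26 := by omega
      have hk2 : k2 < 26 := by omega
      have hin1 := pvIn_letter ch1 c1 hl1 ha1 hz1
      have hin2 := pvIn_letter ch2 c2 hl2 ha2 hz2
      rw [pv_flag_letter ch1 k1 hk1 hin1, pv_flag_letter ch2 k2 hk2 hin2]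
      simp only [Bool.and_self, if_true]
      rw [pvLoop_congr ch1 ch2 k1 k2 hin1 hin2 (List.range 26)
            (fun i hi => List.mem_range.mp hi),
          pvLoopN_range k1 hk1 k2 hk2]
      have hd : (decide (k2 ≤ k1)) = (decide (p2 ≤ p1)) := by
        rw [hv1, hv2]
        by_cases h : k2 ≤ k1
        · rw [decide_eq_true h, eq_comm, decide_eq_true_eq]; omega
        · rw [decide_eq_false h, eq_comm, decide_eq_false_iff_not]; omega
      rw [hd]
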